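-- pv_equiv track=rewrite | github.com/hmghaly/word_align | align_utils.py | get_adj_pts
-- ===== SOURCE A (Python) =====
-- def get_adj_pts(x,y,x_dim,y_dim,max_offset=2):
--   next_x_list=[]
--   next_y_list=[]
--   prev_y_list=[]
--   for of0 in range(1,max_offset+1): #get possible horizontal offsets
--     next_x0=x+of0
--     if next_x0>=x_dim: break
--     next_x_list.append(next_x0)
--   for of0 in range(1,max_offset+1): #get possible vertical offsets (next)
--     next_y0=y+of0
--     if next_y0>=y_dim: break
--     next_y_list.append(next_y0)
--   for of0 in range(1,max_offset+1): #get possible vertical offsets (prev)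
--     prev_y0=y-of0
--     if prev_y0<0: break
--     prev_y_list.append(prev_y0)
--
--   all_next_pts=[]
--   all_next_pts.extend([(x,y1) for y1 in next_y_list]) #vertical next points
--   all_next_pts.extend([(x1,y) for x1 in next_x_list]) #horizontal next points
--   all_next_pts.extend([(x1,y1) for x1 in next_x_list for y1 in next_y_list+prev_y_list]) #diagonal adjacent points
--   return sorted(all_next_pts)
-- ===== SOURCE B (Python) =====
-- def get_adj_pts(x, y, x_dim, y_dim, max_offset=2):
--     # clamp the offset window to the grid once, instead of testing every point
--     dx_hi = min(max_offset, max(x_dim - 1 - x, 0))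
--     dy_lo = max(-max_offset, min(-y, 0))
--     dy_hi = min(max_offset, max(y_dim - 1 - y, 0))
--     pts = []
--     for dx in range(0, dx_hi + 1):
--         for dy in range(dy_lo, dy_hi + 1):
--             if dx == 0 and dy <= 0:
--                 continue  # backward/same-column offsets on the current column are never emitted
--             pts.append((x + dx, y + dy))
--     return sorted(pts)
-- ===== Notes on version B (the rewrite author's own statement) =====
-- stated objective: simpler
-- what changed: Replaced the three break-truncated axis lists plus three extend/cross-product passes by clamping the offset window to the grid up front and doing one nested scan over (dx,dy) pairs with a single skip condition, then the same final sort.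
import Mathlib
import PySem

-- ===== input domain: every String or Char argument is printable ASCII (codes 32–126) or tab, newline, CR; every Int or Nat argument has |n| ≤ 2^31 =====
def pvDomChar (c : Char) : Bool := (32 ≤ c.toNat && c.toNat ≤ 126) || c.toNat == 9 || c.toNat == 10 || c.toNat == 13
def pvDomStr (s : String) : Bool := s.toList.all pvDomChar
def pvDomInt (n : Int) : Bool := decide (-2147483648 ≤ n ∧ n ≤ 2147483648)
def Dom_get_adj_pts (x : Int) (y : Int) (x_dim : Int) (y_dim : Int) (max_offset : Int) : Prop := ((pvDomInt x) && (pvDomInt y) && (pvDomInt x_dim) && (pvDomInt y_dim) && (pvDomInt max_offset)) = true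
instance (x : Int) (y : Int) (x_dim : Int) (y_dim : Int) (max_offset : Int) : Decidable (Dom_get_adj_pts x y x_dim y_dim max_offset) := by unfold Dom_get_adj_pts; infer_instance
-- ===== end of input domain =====

-- B replaces A's three break-truncated axis lists and three extend/cross-product passes by clamping
-- the offset window to the grid up front and doing one nested scan over (dx, dy) pairs, then the same final sort (objective: simpler).

-- ===== PORT A =====
-- one 'for of0 in range(1, max_offset+1): v = f(of0); if bad(v): break; acc.append(v)' loop
-- (A's three offset loops are three instances of this shape)
def pvBreakLoop (f : Int → Int) (bad : Int → Bool) : List Int → List Int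
  | [] => []
  | o :: rest => let v := f o; if bad v then [] else v :: pvBreakLoop f bad rest

def get_adj_pts (x : Int) (y : Int) (x_dim : Int) (y_dim : Int) (max_offset : Int) : List (Int × Int) :=
  let next_x_list := pvBreakLoop (fun of0 => x + of0) (fun v => decide (x_dim ≤ v)) (PySem.List.pyRange 1 (max_offset + 1) 1)
  let next_y_list := pvBreakLoop (fun of0 => y + of0) (fun v => decide (y_dim ≤ v)) (PySem.List.pyRange 1 (max_offset + 1) 1)
  let prev_y_list := pvBreakLoop (fun of0 => y - of0) (fun v => decide (v < 0)) (PySem.List.pyRange 1 (max_offset + 1) 1)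
  let all_next_pts : List (Int × Int) :=
    next_y_list.map (fun y1 => (x, y1))
    ++ next_x_list.map (fun x1 => (x1, y))
    ++ next_x_list.flatMap (fun x1 => (next_y_list ++ prev_y_list).map (fun y1 => (x1, y1)))
  PySem.List.sorted all_next_pts (fun p => toLex p) false

-- ===== PORT B =====
def get_adj_pts_alt (x : Int) (y : Int) (x_dim : Int) (y_dim : Int) (max_offset : Int) : List (Int × Int) :=
  let dx_hi := min max_offset (max (x_dim - 1 - x) 0)
  let dy_lo := max (-max_offset) (min (-y) 0)
  let dy_hi := min max_offset (max (y_dim - 1 - y) 0)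
  let pts := (PySem.List.pyRange 0 (dx_hi + 1) 1).foldl (fun acc dx =>
      (PySem.List.pyRange dy_lo (dy_hi + 1) 1).foldl (fun acc2 dy =>
        if dx = 0 ∧ dy ≤ 0 then acc2
        else acc2 ++ [(x + dx, y + dy)]) acc) []
  PySem.List.sorted pts (fun p => toLex p) false

-- ===== PRECONDITION & SPEC =====
def Spec_get_adj_pts (x : Int) (y : Int) (x_dim : Int) (y_dim : Int) (max_offset : Int) (out : List (Int × Int)) : Prop := out = get_adj_pts_alt x y x_dim y_dim max_offset
instance (x : Int) (y : Int) (x_dim : Int) (y_dim : Int) (max_offset : Int) (out : List (Int × Int)) : Decidable (Spec_get_adj_pts x y x_dim y_dim max_offset out) := by unfold Spec_get_adj_pts; infer_instance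

-- ===== CLAIM (what is proved, stated in full; the proofs are below) =====
def Claim_equal_get_adj_pts : Prop := ∀ (x : Int) (y : Int) (x_dim : Int) (y_dim : Int) (max_offset : Int), Dom_get_adj_pts x y x_dim y_dim max_offset → Spec_get_adj_pts x y x_dim y_dim max_offset (get_adj_pts x y x_dim y_dim max_offset)

-- ===== LEMMAS AND PROOFS =====

-- B's keep-condition for an offset pair, as one Bool
def pvKeep (x : Int) (y : Int) (x_dim : Int) (y_dim : Int) (dx : Int) (dy : Int) : Bool :=
  decide (¬(dx = 0 ∧ dy ≤ 0) ∧ ¬(0 < dx ∧ x_dim ≤ x + dx)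
    ∧ ¬(0 < dy ∧ y_dim ≤ y + dy) ∧ ¬(dy < 0 ∧ y + dy < 0))

-- a break-loop over an increasing range with a monotone bad-test is filter-then-map
theorem pvBreakLoop_eq_filter_map (f : Int → Int) (bad : Int → Bool) (a b : Int)
    (mono : ∀ o o' : Int, o ≤ o' → bad (f o) = true → bad (f o') = true) :
    pvBreakLoop f bad (PySem.List.pyRange a b 1)
      = ((PySem.List.pyRange a b 1).filter (fun o => !bad (f o))).map f := by
  generalize hn : (b - a).toNat = n
  induction n generalizing a with
  | zero =>
    have hempty : PySem.List.pyRange a b 1 = [] := by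
      simp only [PySem.List.pyRange]; simp; omega
    simp [hempty, pvBreakLoop]
  | succ n ih =>
    have hab : a < b := by omega
    rw [PySem.List.pyRange_one_cons hab]
    simp only [pvBreakLoop, List.filter_cons]
    by_cases hb : bad (f a) = true
    · have hrest : (PySem.List.pyRange (a + 1) b 1).filter (fun o => !bad (f o)) = [] := by
        apply List.filter_eq_nil_iff.mpr
        intro o ho
        have hmem := PySem.List.mem_pyRange_one.mp ho
        simp [mono a o (by omega) hb]
      simp [hb, hrest]
    · have ih' := ih (a + 1) (by omega)
      simp [hb, ih']

-- an empty integer range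
theorem pv_range_empty {a b : Int} (h : b ≤ a) : PySem.List.pyRange a b 1 = [] := by
  simp only [PySem.List.pyRange]; simp; omega

-- two ranges are equal when their endpoints agree or both are empty
theorem pvRange_eq {a b a' b' : Int} (h : (a = a' ∧ b = b') ∨ (b ≤ a ∧ b' ≤ a')) :
    PySem.List.pyRange a b 1 = PySem.List.pyRange a' b' 1 := by
  rcases h with ⟨h1, h2⟩ | ⟨h1, h2⟩
  · rw [h1, h2]
  · rw [pv_range_empty h1, pv_range_empty h2]

theorem pv_filter_lt (a b c : Int) :
    (PySem.List.pyRange a b 1).filter (fun o => decide (o < c)) = PySem.List.pyRange a (min b c) 1 := by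
  generalize hn : (b - a).toNat = n
  induction n generalizing a with
  | zero =>
    rw [pv_range_empty (by omega), pv_range_empty (by omega), List.filter_nil]
  | succ n ih =>
    have hab : a < b := by omega
    rw [PySem.List.pyRange_one_cons hab, List.filter_cons]
    by_cases hc : a < c
    · rw [PySem.List.pyRange_one_cons (a := a) (b := min b c) (by omega), ih (a + 1) (by omega)]
      simp [hc]
    · have hrest : (PySem.List.pyRange (a + 1) b 1).filter (fun o => decide (o < c)) = [] := by
        apply List.filter_eq_nil_iff.mpr
        intro o ho
        have hb := PySem.List.mem_pyRange_one.mp ho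
        simp; omega
      rw [pv_range_empty (show min b c ≤ a by omega)]
      simp only [hrest]
      simp; omega

theorem pv_filter_ge (a b c : Int) :
    (PySem.List.pyRange a b 1).filter (fun o => decide (c ≤ o)) = PySem.List.pyRange (max a c) b 1 := by
  generalize hn : (b - a).toNat = n
  induction n generalizing a with
  | zero =>
    rw [pv_range_empty (by omega), pv_range_empty (by omega), List.filter_nil]
  | succ n ih =>
    have hab : a < b := by omega
    by_cases hc : c ≤ a
    · rw [show max a c = a by omega]
      apply List.filter_eq_self.mpr
      intro o ho
      have hb := PySem.List.mem_pyRange_one.mp ho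
      simp; omega
    · rw [PySem.List.pyRange_one_cons hab, List.filter_cons, ih (a + 1) (by omega),
          pvRange_eq (a := max (a + 1) c) (a' := max a c) (b := b) (b' := b) (by omega),
          if_neg (by simp; omega)]

theorem pv_flatMap_congr {α β : Type} (g1 g2 : α → List β) (l : List α)
    (h : ∀ o ∈ l, g1 o = g2 o) : l.flatMap g1 = l.flatMap g2 := by
  induction l with
  | nil => simp
  | cons a t ih =>
    simp only [List.flatMap_cons]
    rw [h a (by simp), ih (fun o ho => h o (by simp [ho]))]

-- B's accumulated point list, as flatMap of a filtered clamped window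
theorem pvB_pts_alt (x y x_dim y_dim m : Int) :
    (PySem.List.pyRange 0 (min m (max (x_dim - 1 - x) 0) + 1) 1).foldl (fun acc dx =>
      (PySem.List.pyRange (max (-m) (min (-y) 0)) (min m (max (y_dim - 1 - y) 0) + 1) 1).foldl
        (fun acc2 dy => if dx = 0 ∧ dy ≤ 0 then acc2 else acc2 ++ [(x + dx, y + dy)]) acc) []
    = (PySem.List.pyRange 0 (min m (max (x_dim - 1 - x) 0) + 1) 1).flatMap (fun dx =>
        ((PySem.List.pyRange (max (-m) (min (-y) 0)) (min m (max (y_dim - 1 - y) 0) + 1) 1).filter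
          (fun dy => !decide (dx = 0 ∧ dy ≤ 0))).map (fun dy => (x + dx, y + dy))) := by
  have hstep : (fun (acc : List (Int × Int)) (dx : Int) =>
      (PySem.List.pyRange (max (-m) (min (-y) 0)) (min m (max (y_dim - 1 - y) 0) + 1) 1).foldl
        (fun acc2 dy => if dx = 0 ∧ dy ≤ 0 then acc2 else acc2 ++ [(x + dx, y + dy)]) acc)
      = (fun acc dx => acc ++
        ((PySem.List.pyRange (max (-m) (min (-y) 0)) (min m (max (y_dim - 1 - y) 0) + 1) 1).filter
          (fun dy => !decide (dx = 0 ∧ dy ≤ 0))).map (fun dy => (x + dx, y + dy))) := by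
    funext acc dx
    rw [← PySem.List.foldl_append_if (fun dy => !decide (dx = 0 ∧ dy ≤ 0))
        (fun dy => (x + dx, y + dy)) _ acc]
    congr 1
    funext acc2 dy
    by_cases h : dx = 0 ∧ dy ≤ 0 <;> simp [h]
  rw [hstep, PySem.List.foldl_append_eq_flatMap]
  simp

-- B's clamped-window scan produces the same list as the unclamped per-point-checked scan
theorem pvB_flat_eq (x y x_dim y_dim m : Int) :
    (PySem.List.pyRange 0 (min m (max (x_dim - 1 - x) 0) + 1) 1).flatMap (fun dx =>
        ((PySem.List.pyRange (max (-m) (min (-y) 0)) (min m (max (y_dim - 1 - y) 0) + 1) 1).filter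
          (fun dy => !decide (dx = 0 ∧ dy ≤ 0))).map (fun dy => (x + dx, y + dy)))
    = (PySem.List.pyRange 0 (m + 1) 1).flatMap (fun dx =>
        ((PySem.List.pyRange (-m) (m + 1) 1).filter (fun dy => pvKeep x y x_dim y_dim dx dy)).map
          (fun dy => (x + dx, y + dy))) := by
  by_cases hm : 0 ≤ m
  · rw [PySem.List.pyRange_one_append 0 (min m (max (x_dim - 1 - x) 0) + 1) (m + 1)
        (by omega) (by omega), List.flatMap_append]
    have htail : (PySem.List.pyRange (min m (max (x_dim - 1 - x) 0) + 1) (m + 1) 1).flatMap (fun dx =>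
        ((PySem.List.pyRange (-m) (m + 1) 1).filter (fun dy => pvKeep x y x_dim y_dim dx dy)).map
          (fun dy => (x + dx, y + dy))) = [] := by
      apply List.flatMap_eq_nil_iff.mpr
      intro dx hdx
      have hb := PySem.List.mem_pyRange_one.mp hdx
      have hfil : (PySem.List.pyRange (-m) (m + 1) 1).filter
          (fun dy => pvKeep x y x_dim y_dim dx dy) = [] := by
        apply List.filter_eq_nil_iff.mpr
        intro dy _
        simp only [pvKeep, decide_eq_true_eq]; omega
      simp [hfil]
    rw [htail, List.append_nil]
    apply pv_flatMap_congr
    intro dx hdx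
    have hdxb := PySem.List.mem_pyRange_one.mp hdx
    congr 1
    by_cases h0 : dx = 0
    · subst h0
      rw [List.filter_congr (q := fun dy => decide (1 ≤ dy)) (fun dy _ => by
            simp only [← decide_not, decide_eq_decide, true_and]; omega),
          pv_filter_ge,
          List.filter_congr (q := fun dy => decide (dy < y_dim - y) && decide (1 ≤ dy))
            (fun dy hdy => by
              have hb2 := PySem.List.mem_pyRange_one.mp hdy
              simp only [pvKeep, ← Bool.decide_and, decide_eq_decide, true_and]; omega),
          ← List.filter_filter, pv_filter_ge, pv_filter_lt]
      apply pvRange_eq; omega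
    · have hx : x + dx < x_dim := by omega
      have hL : (PySem.List.pyRange (max (-m) (min (-y) 0)) (min m (max (y_dim - 1 - y) 0) + 1) 1).filter
          (fun dy => !decide (dx = 0 ∧ dy ≤ 0))
          = PySem.List.pyRange (max (-m) (min (-y) 0)) (min m (max (y_dim - 1 - y) 0) + 1) 1 := by
        apply List.filter_eq_self.mpr
        intro dy _
        simp; omega
      have hR1 : (PySem.List.pyRange (-m) 1 1).filter (fun dy => pvKeep x y x_dim y_dim dx dy)
          = PySem.List.pyRange (max (-m) (min (-y) 0)) 1 1 := by
        rw [List.filter_congr (q := fun dy => decide (min (-y) 0 ≤ dy)) (fun dy hdy => by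
              have hb2 := PySem.List.mem_pyRange_one.mp hdy
              simp only [pvKeep, decide_eq_decide]; omega),
            pv_filter_ge]
      have hR2 : (PySem.List.pyRange 1 (m + 1) 1).filter (fun dy => pvKeep x y x_dim y_dim dx dy)
          = PySem.List.pyRange 1 (min m (max (y_dim - 1 - y) 0) + 1) 1 := by
        rw [List.filter_congr (q := fun dy => decide (dy < y_dim - y)) (fun dy hdy => by
              have hb2 := PySem.List.mem_pyRange_one.mp hdy
              simp only [pvKeep, decide_eq_decide]; omega),
            pv_filter_lt]
        apply pvRange_eq; omega
      rw [hL, PySem.List.pyRange_one_append (-m) 1 (m + 1) (by omega) (by omega),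
          List.filter_append, hR1, hR2]
      exact PySem.List.pyRange_one_append (max (-m) (min (-y) 0)) 1
        (min m (max (y_dim - 1 - y) 0) + 1) (by omega) (by omega)
  · rw [pv_range_empty (show (m + 1 : Int) ≤ 0 by omega),
        pv_range_empty (show (min m (max (x_dim - 1 - x) 0) + 1 : Int) ≤ 0 by omega)]
    simp

theorem pv_map_append_flatMap_perm {α β : Type} (f : α → β) (g : α → List β) (l : List α) :
    (l.map f ++ l.flatMap g).Perm (l.flatMap (fun o => f o :: g o)) := by
  induction l with
  | nil => simp
  | cons a t ih =>
    simp only [List.map_cons, List.flatMap_cons, List.cons_append]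
    exact List.Perm.cons _ (List.Perm.trans (List.perm_append_comm_assoc _ _ _) (ih.append_left (g a)))

theorem pv_flatMap_perm_congr {α β : Type} (g1 g2 : α → List β) (l : List α)
    (h : ∀ o ∈ l, (g1 o).Perm (g2 o)) : (l.flatMap g1).Perm (l.flatMap g2) := by
  induction l with
  | nil => simp
  | cons a t ih =>
    simp only [List.flatMap_cons]
    exact (h a (by simp)).append (ih (fun o ho => h o (by simp [ho])))

theorem pv_flatMap_eq_flatMap_filter {α β : Type} (p : α → Bool) (g : α → List β) (l : List α)
    (h : ∀ o ∈ l, p o = false → g o = []) : l.flatMap g = (l.filter p).flatMap g := by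
  induction l with
  | nil => simp
  | cons a t ih =>
    simp only [List.flatMap_cons, List.filter_cons]
    by_cases hp : p a = true
    · simp [hp, ih (fun o ho => h o (by simp [ho]))]
    · simp only [Bool.not_eq_true] at hp
      simp [hp, h a (by simp) hp, ih (fun o ho => h o (by simp [ho]))]

-- the negative half of B's dy-range is the reversed negation of A's prev-offset range
theorem pv_neg_range (m : Int) (hm : 0 ≤ m) :
    PySem.List.pyRange (-m) 0 1 = (((PySem.List.pyRange 1 (m + 1) 1).map (fun o => -o)).reverse) := by
  induction m, hm using Int.le_induction with
  | base => simp [PySem.List.pyRange]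
  | succ n hn ih =>
    have hcons : PySem.List.pyRange (-(n + 1)) 0 1 = (-(n + 1)) :: PySem.List.pyRange (-n) 0 1 := by
      have := PySem.List.pyRange_one_cons (a := -(n + 1)) (b := 0) (by omega)
      simpa [show -(n + 1) + 1 = -n by ring] using this
    have hsnoc : PySem.List.pyRange 1 (n + 1 + 1) 1 = PySem.List.pyRange 1 (n + 1) 1 ++ [n + 1] :=
      PySem.List.pyRange_one_succ_right (by omega)
    rw [hcons, hsnoc, ih]
    simp

-- the two unsorted point lists are permutations of each other
theorem pv_perm (x y x_dim y_dim m : Int) :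
    ((pvBreakLoop (fun of0 => y + of0) (fun v => decide (y_dim ≤ v)) (PySem.List.pyRange 1 (m + 1) 1)).map (fun y1 => (x, y1))
      ++ (pvBreakLoop (fun of0 => x + of0) (fun v => decide (x_dim ≤ v)) (PySem.List.pyRange 1 (m + 1) 1)).map (fun x1 => (x1, y))
      ++ (pvBreakLoop (fun of0 => x + of0) (fun v => decide (x_dim ≤ v)) (PySem.List.pyRange 1 (m + 1) 1)).flatMap
          (fun x1 => ((pvBreakLoop (fun of0 => y + of0) (fun v => decide (y_dim ≤ v)) (PySem.List.pyRange 1 (m + 1) 1)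
              ++ pvBreakLoop (fun of0 => y - of0) (fun v => decide (v < 0)) (PySem.List.pyRange 1 (m + 1) 1)).map (fun y1 => (x1, y1))))).Perm
    ((PySem.List.pyRange 0 (m + 1) 1).flatMap (fun dx =>
        (((PySem.List.pyRange (-m) (m + 1) 1).filter (fun dy => pvKeep x y x_dim y_dim dx dy)).map
          (fun dy => (x + dx, y + dy))))) := by
  rw [pvBreakLoop_eq_filter_map (fun of0 => y + of0) (fun v => decide (y_dim ≤ v)) 1 (m + 1)
        (by intro o o' h hb; simp only [decide_eq_true_eq] at *; omega),
      pvBreakLoop_eq_filter_map (fun of0 => x + of0) (fun v => decide (x_dim ≤ v)) 1 (m + 1)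
        (by intro o o' h hb; simp only [decide_eq_true_eq] at *; omega),
      pvBreakLoop_eq_filter_map (fun of0 => y - of0) (fun v => decide (v < 0)) 1 (m + 1)
        (by intro o o' h hb; simp only [decide_eq_true_eq] at *; omega)]
  by_cases hm : 0 ≤ m
  · -- the heavy case
    set FY := (PySem.List.pyRange 1 (m + 1) 1).filter (fun o => !decide (y_dim ≤ y + o)) with hFY
    set FX := (PySem.List.pyRange 1 (m + 1) 1).filter (fun o => !decide (x_dim ≤ x + o)) with hFX
    set FP := (PySem.List.pyRange 1 (m + 1) 1).filter (fun o => !decide (y - o < 0)) with hFP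
    rw [show PySem.List.pyRange 0 (m + 1) 1 = 0 :: PySem.List.pyRange 1 (m + 1) 1 from
        PySem.List.pyRange_one_cons (by omega)]
    simp only [List.flatMap_cons]
    have hsplit : PySem.List.pyRange (-m) (m + 1) 1
        = PySem.List.pyRange (-m) 1 1 ++ PySem.List.pyRange 1 (m + 1) 1 :=
      PySem.List.pyRange_one_append (-m) 1 (m + 1) (by omega) (by omega)
    -- the dx = 0 block of B is exactly A's vertical-next block
    have hV : (FY.map (fun of0 => y + of0)).map (fun y1 => (x, y1))
        = ((PySem.List.pyRange (-m) (m + 1) 1).filter (fun dy => pvKeep x y x_dim y_dim 0 dy)).map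
            (fun dy => (x + 0, y + dy)) := by
      rw [hsplit, List.filter_append]
      have hneg : (PySem.List.pyRange (-m) 1 1).filter (fun dy => pvKeep x y x_dim y_dim 0 dy) = [] := by
        apply List.filter_eq_nil_iff.mpr
        intro dy hdy
        have hb := PySem.List.mem_pyRange_one.mp hdy
        simp only [pvKeep, decide_eq_true_eq, true_and]; omega
      have hpos : (PySem.List.pyRange 1 (m + 1) 1).filter (fun dy => pvKeep x y x_dim y_dim 0 dy) = FY := by
        rw [hFY]
        apply List.filter_congr
        intro dy hdy
        have hb := PySem.List.mem_pyRange_one.mp hdy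
        simp only [pvKeep, ← decide_not, decide_eq_decide]; omega
      rw [hneg, hpos]
      simp [List.map_map, Function.comp_def]
    -- the dx > 0 blocks
    have hrest : (PySem.List.pyRange 1 (m + 1) 1).flatMap (fun dx =>
          (((PySem.List.pyRange (-m) (m + 1) 1).filter (fun dy => pvKeep x y x_dim y_dim dx dy)).map
            (fun dy => (x + dx, y + dy))))
        = FX.flatMap (fun dx =>
          (((PySem.List.pyRange (-m) (m + 1) 1).filter (fun dy => pvKeep x y x_dim y_dim dx dy)).map
            (fun dy => (x + dx, y + dy)))) := by
      rw [hFX]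
      apply pv_flatMap_eq_flatMap_filter
      intro o ho hfalse
      have hb := PySem.List.mem_pyRange_one.mp ho
      have hxo : x_dim ≤ x + o := by simpa using hfalse
      have : (PySem.List.pyRange (-m) (m + 1) 1).filter (fun dy => pvKeep x y x_dim y_dim o dy) = [] := by
        apply List.filter_eq_nil_iff.mpr
        intro dy _
        simp only [pvKeep, decide_eq_true_eq]; omega
      simp [this]
    have hHD : ((FX.map (fun of0 => x + of0)).map (fun x1 => (x1, y))
          ++ (FX.map (fun of0 => x + of0)).flatMap (fun x1 =>
              ((FY.map (fun of0 => y + of0) ++ FP.map (fun of0 => y - of0)).map (fun y1 => (x1, y1))))).Perm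
        (FX.flatMap (fun dx =>
          (((PySem.List.pyRange (-m) (m + 1) 1).filter (fun dy => pvKeep x y x_dim y_dim dx dy)).map
            (fun dy => (x + dx, y + dy))))) := by
      rw [List.map_map, List.flatMap_map]
      refine (pv_map_append_flatMap_perm _ _ FX).trans ?_
      apply pv_flatMap_perm_congr
      intro o ho
      have hmem := List.mem_filter.mp ho
      have hb := PySem.List.mem_pyRange_one.mp hmem.1
      have hx : x + o < x_dim := by simpa using hmem.2
      -- split B's dy range into negative part, {0}, positive part
      have hsplit2 : PySem.List.pyRange (-m) (m + 1) 1
          = PySem.List.pyRange (-m) 0 1 ++ (PySem.List.pyRange 0 1 1 ++ PySem.List.pyRange 1 (m + 1) 1) := by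
        rw [← PySem.List.pyRange_one_append 0 1 (m + 1) (by omega) (by omega),
            ← PySem.List.pyRange_one_append (-m) 0 (m + 1) (by omega) (by omega)]
      have hzero : PySem.List.pyRange 0 1 1 = [0] := by decide
      rw [hsplit2, hzero, List.filter_append, List.filter_append, List.map_append, List.map_append]
      have hmid : List.filter (fun dy => pvKeep x y x_dim y_dim o dy) [0] = [0] := by
        simp only [List.filter_cons, List.filter_nil, pvKeep]
        rw [if_pos (by simp; omega)]
      have hpos2 : (PySem.List.pyRange 1 (m + 1) 1).filter (fun dy => pvKeep x y x_dim y_dim o dy) = FY := by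
        rw [hFY]
        apply List.filter_congr
        intro dy hdy
        have hdyb := PySem.List.mem_pyRange_one.mp hdy
        simp only [pvKeep, ← decide_not, decide_eq_decide]; omega
      have hnegf : (PySem.List.pyRange (-m) 0 1).filter (fun dy => pvKeep x y x_dim y_dim o dy)
          = (PySem.List.pyRange (-m) 0 1).filter (fun dy => !decide (y + dy < 0)) := by
        apply List.filter_congr
        intro dy hdy
        have hdyb := PySem.List.mem_pyRange_one.mp hdy
        simp only [pvKeep, ← decide_not, decide_eq_decide]; omega
      have hneg2 : ((PySem.List.pyRange (-m) 0 1).filter (fun dy => pvKeep x y x_dim y_dim o dy)).map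
            (fun dy => (x + o, y + dy))
          = ((FP.map (fun of0 => y - of0)).map (fun y1 => ((x + o : Int), y1))).reverse := by
        rw [hnegf, pv_neg_range m hm, List.filter_reverse, List.map_reverse, List.filter_map,
            List.map_map, hFP]
        congr 1
        rw [show List.filter ((fun dy => !decide (y + dy < 0)) ∘ fun o => -o)
              (PySem.List.pyRange 1 (m + 1) 1)
            = List.filter (fun o' => !decide (y - o' < 0)) (PySem.List.pyRange 1 (m + 1) 1) from
          List.filter_congr (fun o' _ => by
            simp only [Function.comp_apply, ← decide_not, decide_eq_decide]; omega),
          List.map_map]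
        apply List.map_congr_left
        intro o' _
        simp [Function.comp_apply, sub_eq_add_neg]
      rw [hmid, hpos2, hneg2]
      -- now a pure permutation rearrangement
      apply List.perm_iff_count.mpr
      intro p
      simp [List.count_append, List.count_reverse, List.count_cons,
        List.map_map, Function.comp_def, add_zero]
      omega
    rw [List.append_assoc, hV, hrest]
    exact hHD.append_left _
  · -- max_offset < 0: every range is empty on both sides
    have h1 : PySem.List.pyRange 1 (m + 1) 1 = [] := by
      simp only [PySem.List.pyRange]; simp; omega
    have h0 : PySem.List.pyRange 0 (m + 1) 1 = [] := by
      simp only [PySem.List.pyRange]; simp; omega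
    simp [h1, h0]

-- ===== VERDICT (by name: the statement is the Claim_ definition above) =====
theorem get_adj_pts_spec : Claim_equal_get_adj_pts := by
  intro x y x_dim y_dim m _
  show _ = _
  simp only [get_adj_pts, get_adj_pts_alt]
  rw [pvB_pts_alt, pvB_flat_eq]
  exact PySem.List.sorted_eq_sorted_of_perm _ _ (fun p => toLex p) (toLex.injective) (pv_perm x y x_dim y_dim m)
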